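-- pv_equiv track=rewrite | github.com/consoles/dsa4js | app/leetcode/No2094.findEvenNumbers.py | findEvenNumbers3
-- ===== SOURCE A (Python) =====
-- from typing import List
--
-- def findEvenNumbers3(digits: List[int]) -> List[int]:
--     """
--     回溯：百位不为 0，十位随便填，个位是偶数即可
--     """
--     cnt = [0] * 10
--     for d in digits:
--         cnt[d] += 1
--
--     ans = []
--     def dfs(i: int, x: int):
--         """
--         i = 0, 百位；i = 1, 十位；i = 2, 个位
--         x 表示正在构造的数字
--         """
--         if i == 3:
--             ans.append(x)
--             return
--         for d, c in enumerate(cnt):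
--             if c > 0 and (i == 0 and d > 0 or i == 1 or i == 2 and d % 2 == 0):
--                 cnt[d] -= 1 # 消耗一个数字 d
--                 dfs(i + 1, x * 10 + d)
--                 cnt[d] += 1 # 复原
--     dfs(0, 0)
--     return ans
-- ===== SOURCE B (Python) =====
-- from typing import List
--
-- def _fits(cnt: List[int], num: int) -> bool:
--     need = [0] * 10
--     need[num // 100] += 1
--     need[num // 10 % 10] += 1
--     need[num % 10] += 1
--     return all(need[v] <= cnt[v] for v in range(10))
--
-- def findEvenNumbers3(digits: List[int]) -> List[int]:
--     cnt = [0] * 10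
--     for d in digits:
--         cnt[d] += 1
--     ans = []
--     for num in range(100, 1000, 2):
--         if _fits(cnt, num):
--             ans.append(num)
--     return ans
-- ===== Notes on version B (the rewrite author's own statement) =====
-- stated objective: simpler
-- what changed: Replaces A's backtracking DFS over the digit counter (with in-place decrement/restore) by a single flat scan of the even numbers 100..998 that keeps a number iff its digit multiset fits the counter.
import Mathlib
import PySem

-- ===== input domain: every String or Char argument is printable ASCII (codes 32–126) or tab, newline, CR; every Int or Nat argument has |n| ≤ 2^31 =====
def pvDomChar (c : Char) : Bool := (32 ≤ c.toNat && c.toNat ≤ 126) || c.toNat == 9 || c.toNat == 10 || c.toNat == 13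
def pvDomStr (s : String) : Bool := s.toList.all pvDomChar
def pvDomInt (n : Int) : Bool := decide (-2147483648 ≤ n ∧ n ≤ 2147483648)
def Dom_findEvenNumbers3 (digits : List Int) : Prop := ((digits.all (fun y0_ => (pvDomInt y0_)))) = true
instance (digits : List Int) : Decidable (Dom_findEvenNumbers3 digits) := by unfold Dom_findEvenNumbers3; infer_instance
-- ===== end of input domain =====

-- B replaces A's backtracking DFS over the digit counter by a direct scan of the even numbers
-- 100..998, keeping those whose digit multiset fits the counter (objective: simpler).

-- ===== PORT A =====
-- shared first loop of both Pythons: cnt = [0]*10; for d in digits: cnt[d] += 1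
def pvCount (digits : List Int) : List Int :=
  digits.foldl
    (fun cnt d => PySem.List.pySetD cnt d (PySem.List.pyGetD cnt d 0 + 1))
    (List.replicate 10 (0 : Int))

-- the guard 'i == 0 and d > 0 or i == 1 or i == 2 and d % 2 == 0'
def pvCond (i : Nat) (d : Int) : Bool :=
  (i == 0 && decide (0 < d)) || i == 1 || (i == 2 && (PySem.Int.mod d 2 == 0))

-- dfs(i, x); recursion is on fuel = 3 - i, so 'i == 3' is fuel = 0
def pvDfs : Nat → List Int → Int → List Int → List Int
  | 0, _, x, ans => ans ++ [x]
  | (fuel+1), cnt, x, ans =>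
    (PySem.List.enumerate cnt).foldl
      (fun ans' p =>
        if decide (0 < p.2) && pvCond (2 - fuel) p.1 then
          pvDfs fuel (PySem.List.pySetD cnt p.1 (p.2 - 1)) (x * 10 + p.1) ans'
        else ans')
      ans

def findEvenNumbers3 (digits : List Int) : List Int :=
  pvDfs 3 (pvCount digits) 0 []

-- ===== PORT B =====
def pvFits (cnt : List Int) (num : Int) : Bool :=
  let need0 : List Int := List.replicate 10 0
  let i1 := PySem.Int.floordiv num 100
  let need1 := PySem.List.pySetD need0 i1 (PySem.List.pyGetD need0 i1 0 + 1)
  let i2 := PySem.Int.mod (PySem.Int.floordiv num 10) 10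
  let need2 := PySem.List.pySetD need1 i2 (PySem.List.pyGetD need1 i2 0 + 1)
  let i3 := PySem.Int.mod num 10
  let need3 := PySem.List.pySetD need2 i3 (PySem.List.pyGetD need2 i3 0 + 1)
  (PySem.List.pyRange 0 10 1).all
    (fun v => decide (PySem.List.pyGetD need3 v 0 ≤ PySem.List.pyGetD cnt v 0))

def findEvenNumbers3_alt (digits : List Int) : List Int :=
  let cnt := pvCount digits
  (PySem.List.pyRange 100 1000 2).foldl
    (fun ans num => if pvFits cnt num then ans ++ [num] else ans) []

-- ===== PRECONDITION & SPEC =====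
-- Pre_ excludes digits outside -10..9: there Python's cnt[d] raises IndexError.
def Pre_findEvenNumbers3 (digits : List Int) : Prop := ∀ d ∈ digits, -10 ≤ d ∧ d < 10
instance (digits : List Int) : Decidable (Pre_findEvenNumbers3 digits) := by
  unfold Pre_findEvenNumbers3; infer_instance
def pvWitness_findEvenNumbers3 : List Int := [2, 2, 8, 4]

def Spec_findEvenNumbers3 (digits : List Int) (out : List Int) : Prop := out = findEvenNumbers3_alt digits
instance (digits : List Int) (out : List Int) : Decidable (Spec_findEvenNumbers3 digits out) := by unfold Spec_findEvenNumbers3; infer_instance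

-- ===== CLAIM (what is proved, stated in full; the proofs are below) =====
def Claim_equal_findEvenNumbers3 : Prop := ∀ (digits : List Int), Dom_findEvenNumbers3 digits → Pre_findEvenNumbers3 digits → Spec_findEvenNumbers3 digits (findEvenNumbers3 digits)

-- ===== LEMMAS AND PROOFS =====

-- the ten digit values
def pvD : List Int := [0, 1, 2, 3, 4, 5, 6, 7, 8, 9]

-- the guard chain A's dfs applies along the branch (h, t, u)
def pvLeafA (cnt : List Int) (h t u : Int) : Bool :=
  let c1 := PySem.List.pySetD cnt h (PySem.List.pyGetD cnt h 0 - 1)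
  let c2 := PySem.List.pySetD c1 t (PySem.List.pyGetD c1 t 0 - 1)
  ((decide (0 < PySem.List.pyGetD cnt h 0) && pvCond 0 h) &&
   (decide (0 < PySem.List.pyGetD c1 t 0) && pvCond 1 t)) &&
  (decide (0 < PySem.List.pyGetD c2 u 0) && pvCond 2 u)

lemma pv_foldl_pull {α β : Type} (S : List β → α → List β) (g : α → List β)
    (hS : ∀ a x, S a x = a ++ g x) :
    ∀ (l : List α) (acc : List β), l.foldl S acc = acc ++ l.flatMap g := by
  intro l
  induction l with
  | nil => intro acc; simp
  | cons x xs ih => intro acc; simp [List.foldl, hS, ih]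

lemma pvDfs_append (fuel : Nat) : ∀ (cnt : List Int) (x : Int) (ans : List Int),
    pvDfs fuel cnt x ans = ans ++ pvDfs fuel cnt x [] := by
  induction fuel with
  | zero => intro cnt x ans; simp [pvDfs]
  | succ fuel ih =>
    intro cnt x ans
    have hS : ∀ (a : List Int) (p : Int × Int),
        (if decide (0 < p.2) && pvCond (2 - fuel) p.1 then
          pvDfs fuel (PySem.List.pySetD cnt p.1 (p.2 - 1)) (x * 10 + p.1) a
        else a) = a ++ (if decide (0 < p.2) && pvCond (2 - fuel) p.1 then
          pvDfs fuel (PySem.List.pySetD cnt p.1 (p.2 - 1)) (x * 10 + p.1) [] else []) := by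
      intro a p
      by_cases hp : (decide (0 < p.2) && pvCond (2 - fuel) p.1) = true
      · rw [if_pos hp, if_pos hp, ih]
      · rw [if_neg hp, if_neg hp, List.append_nil]
    show (PySem.List.enumerate cnt).foldl _ ans = ans ++ (PySem.List.enumerate cnt).foldl _ []
    rw [pv_foldl_pull _ _ hS, pv_foldl_pull _ _ hS, List.nil_append]

lemma pvDfs_succ (fuel : Nat) (cnt : List Int) (x : Int) (ans : List Int) :
    pvDfs (fuel+1) cnt x ans = ans ++ (PySem.List.enumerate cnt).flatMap
      (fun p => if decide (0 < p.2) && pvCond (2 - fuel) p.1 then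
        pvDfs fuel (PySem.List.pySetD cnt p.1 (p.2 - 1)) (x * 10 + p.1) [] else []) := by
  have hS : ∀ (a : List Int) (p : Int × Int),
      (if decide (0 < p.2) && pvCond (2 - fuel) p.1 then
        pvDfs fuel (PySem.List.pySetD cnt p.1 (p.2 - 1)) (x * 10 + p.1) a
      else a) = a ++ (if decide (0 < p.2) && pvCond (2 - fuel) p.1 then
        pvDfs fuel (PySem.List.pySetD cnt p.1 (p.2 - 1)) (x * 10 + p.1) [] else []) := by
    intro a p
    by_cases hp : (decide (0 < p.2) && pvCond (2 - fuel) p.1) = true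
    · rw [if_pos hp, if_pos hp, pvDfs_append]
    · rw [if_neg hp, if_neg hp, List.append_nil]
  show (PySem.List.enumerate cnt).foldl _ ans = _
  rw [pv_foldl_pull _ _ hS]

lemma pv_enum10 (cnt : List Int) (hlen : cnt.length = 10) :
    PySem.List.enumerate cnt = pvD.map (fun j => (j, PySem.List.pyGetD cnt j 0)) := by
  rw [PySem.List.enumerate_eq_map_pyRange cnt 0]
  have : PySem.List.len cnt = 10 := by simp [PySem.List.len, hlen]  -- guess len def
  rw [this]
  norm_num [show PySem.List.pyRange 0 10 1 = pvD from by decide, pvD]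

lemma pv_if_flatMap {α β : Type} (b : Bool) (l : List α) (f : α → List β) :
    (if b then l.flatMap f else []) = l.flatMap (fun x => if b then f x else []) := by
  cases b <;> simp

lemma pv_if_if {α : Type} (a b : Bool) (x : List α) :
    (if a then (if b then x else []) else []) = (if a && b then x else []) := by
  cases a <;> simp

lemma pv_flatMap_congr {α β : Type} {l : List α} {f g : α → List β}
    (h : ∀ x ∈ l, f x = g x) : l.flatMap f = l.flatMap g := by
  induction l with
  | nil => rfl
  | cons x xs ih =>
    simp only [List.flatMap_cons, h x (by simp), ih (fun y hy => h y (by simp [hy]))]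

lemma pv_filter_flatMap {α β : Type} (p : β → Bool) (g : α → List β) (l : List α) :
    (l.flatMap g).filter p = l.flatMap (fun x => (g x).filter p) := by
  induction l with
  | nil => rfl
  | cons x xs ih => simp [List.filter_append, ih]

lemma pv_filter_if {α : Type} (p : α → Bool) (b : Bool) (n : α) :
    (if b then [n] else []).filter p = (if b && p n then [n] else []) := by
  cases b <;> cases hpn : p n <;> simp [hpn]

lemma pv_count_len (digits : List Int) : (pvCount digits).length = 10 := by
  unfold pvCount
  suffices h : ∀ (acc : List Int), acc.length = 10 →
      (digits.foldl (fun cnt d => PySem.List.pySetD cnt d (PySem.List.pyGetD cnt d 0 + 1)) acc).length = 10 by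
    exact h _ (by simp)
  induction digits with
  | nil => intro acc ha; simpa using ha
  | cons d ds ih => intro acc ha; simpa [List.foldl] using ih _ (by simp [PySem.List.length_pySetD, ha])

lemma pv_count_nonneg (digits : List Int) : ∀ a ∈ pvCount digits, 0 ≤ a := by
  unfold pvCount
  suffices h : ∀ (acc : List Int), (∀ a ∈ acc, 0 ≤ a) →
      ∀ a ∈ digits.foldl (fun cnt d => PySem.List.pySetD cnt d (PySem.List.pyGetD cnt d 0 + 1)) acc, 0 ≤ a by
    exact h _ (by simp)
  induction digits with
  | nil => intro acc ha; simpa using ha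
  | cons d ds ih =>
    intro acc ha
    simp only [List.foldl]
    refine ih _ ?_
    intro a hmem
    have hget : 0 ≤ PySem.List.pyGetD acc d 0 := by
      unfold PySem.List.pyGetD
      cases hg : PySem.List.pyGet? acc d with
      | none => simp
      | some b =>
        have hb : b ∈ acc := by
          unfold PySem.List.pyGet? at hg
          rcases Option.bind_eq_some_iff.mp hg with ⟨k, hk, hbk⟩
          exact List.mem_of_getElem? hbk
        simpa using ha b hb
    unfold PySem.List.pySetD PySem.List.pySet? at hmem
    cases hidx : PySem.List.pyIdx? acc.length d with
    | none => rw [hidx] at hmem; simp at hmem; exact ha a hmem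
    | some k =>
      rw [hidx] at hmem
      simp at hmem
      rcases List.mem_or_eq_of_mem_set hmem with h1 | h1
      · exact ha a h1
      · subst h1; omega


lemma pv_getD_setD (xs : List Int) (i v w : Int) (hi0 : 0 ≤ i) (hi : i < xs.length)
    (hv0 : 0 ≤ v) :
    PySem.List.pyGetD (PySem.List.pySetD xs i w) v 0 =
      if v = i then w else PySem.List.pyGetD xs v 0 := by
  rw [← Int.toNat_of_nonneg hi0, ← Int.toNat_of_nonneg hv0]
  rw [PySem.List.pyGetD_pySetD_natCast xs i.toNat v.toNat w 0 (by omega)]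
  by_cases h : v.toNat = i.toNat
  · simp [h]
  · rw [if_neg h, if_neg (by exact_mod_cast h)]


lemma pv_arith (g : Int → Int) (h t u : Int)
    (hg0 : ∀ v : Int, 0 ≤ v → v < 10 → 0 ≤ g v)
    (hh : 0 ≤ h ∧ h < 10) (ht : 0 ≤ t ∧ t < 10) (hu : 0 ≤ u ∧ u < 10) :
    (0 < g h ∧ 0 < (if t = h then g h - 1 else g t) ∧
      0 < (if u = t then (if t = h then g h - 1 else g t) - 1
           else if u = h then g h - 1 else g u))
    ↔ (∀ v : Int, 0 ≤ v → v < 10 →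
        (if v = h then (1:Int) else 0) + (if v = t then 1 else 0) + (if v = u then 1 else 0)
          ≤ g v) := by
  constructor
  · rintro ⟨h1, h2, h3⟩ v hv1 hv2
    have gv := hg0 v hv1 hv2
    split_ifs at h2 h3 ⊢ <;> subst_vars <;> omega
  · intro hF
    have ih := hF h hh.1 hh.2
    have it := hF t ht.1 ht.2
    have iu := hF u hu.1 hu.2
    split_ifs at ih it iu ⊢ <;> subst_vars <;> omega

lemma pvCond0 (d : Int) : pvCond 0 d = decide (0 < d) := by simp [pvCond]
lemma pvCond1 (d : Int) : pvCond 1 d = true := by simp [pvCond]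
lemma pvCond2 (d : Int) : pvCond 2 d = (PySem.Int.mod d 2 == 0) := by simp [pvCond]

lemma pv_leaf (cnt : List Int) (hlen : cnt.length = 10) (hnn : ∀ a ∈ cnt, 0 ≤ a)
    (h t u : Int) (hh : 0 ≤ h ∧ h < 10) (ht : 0 ≤ t ∧ t < 10) (hu : 0 ≤ u ∧ u < 10) :
    pvLeafA cnt h t u =
      ((decide (0 < h) && (PySem.Int.mod u 2 == 0)) && pvFits cnt (100 * h + 10 * t + u)) := by
  have hGnn : ∀ v : Int, 0 ≤ v → v < 10 → 0 ≤ PySem.List.pyGetD cnt v 0 := by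
    intro v h1 h2
    exact hnn _ (PySem.List.pyGetD_mem cnt 0 (by constructor <;> omega))
  have hi1 : PySem.Int.floordiv (100 * h + 10 * t + u) 100 = h := by
    rw [PySem.Int.floordiv_eq_ediv_of_pos (by norm_num)]; omega
  have hi2 : PySem.Int.mod (PySem.Int.floordiv (100 * h + 10 * t + u) 10) 10 = t := by
    rw [PySem.Int.floordiv_eq_ediv_of_pos (by norm_num),
        PySem.Int.mod_eq_emod_of_pos (by norm_num)]; omega
  have hi3 : PySem.Int.mod (100 * h + 10 * t + u) 10 = u := by
    rw [PySem.Int.mod_eq_emod_of_pos (by norm_num)]; omega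
  have hR : ∀ z : Int, 0 ≤ z → z < 10 →
      PySem.List.pyGetD (List.replicate 10 (0:Int)) z 0 = 0 := by
    intro z h1 h2
    have hm := PySem.List.pyGetD_mem (List.replicate 10 (0:Int)) (i := z) 0
      (by constructor <;> simp <;> omega)
    exact List.eq_of_mem_replicate hm
  unfold pvFits
  simp only [hi1, hi2, hi3]
  set R : List Int := List.replicate 10 (0:Int) with hRdef
  set n1 : List Int := PySem.List.pySetD R h (PySem.List.pyGetD R h 0 + 1) with hn1
  set n2 : List Int := PySem.List.pySetD n1 t (PySem.List.pyGetD n1 t 0 + 1) with hn2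
  set n3 : List Int := PySem.List.pySetD n2 u (PySem.List.pyGetD n2 u 0 + 1) with hn3
  have lenR : R.length = 10 := by simp [hRdef]
  have len1 : n1.length = 10 := by rw [hn1, PySem.List.length_pySetD, lenR]
  have len2 : n2.length = 10 := by rw [hn2, PySem.List.length_pySetD, len1]
  have g1 : ∀ z : Int, 0 ≤ z → z < 10 →
      PySem.List.pyGetD n1 z 0 = (if z = h then 1 else 0) := by
    intro z h1 h2
    rw [hn1, pv_getD_setD R h z _ hh.1 (by rw [lenR]; exact_mod_cast hh.2) h1,
        hR h hh.1 hh.2, hR z h1 h2]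
    split_ifs <;> omega
  have g2 : ∀ z : Int, 0 ≤ z → z < 10 →
      PySem.List.pyGetD n2 z 0 =
        (if z = h then 1 else 0) + (if z = t then 1 else 0) := by
    intro z h1 h2
    rw [hn2, pv_getD_setD n1 t z _ ht.1 (by rw [len1]; exact_mod_cast ht.2) h1,
        g1 t ht.1 ht.2, g1 z h1 h2]
    split_ifs <;> subst_vars <;> omega
  have g3 : ∀ z : Int, 0 ≤ z → z < 10 →
      PySem.List.pyGetD n3 z 0 =
        (if z = h then 1 else 0) + (if z = t then 1 else 0) + (if z = u then 1 else 0) := by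
    intro z h1 h2
    rw [hn3, pv_getD_setD n2 u z _ hu.1 (by rw [len2]; exact_mod_cast hu.2) h1,
        g2 u hu.1 hu.2, g2 z h1 h2]
    split_ifs <;> subst_vars <;> omega
  have harith := pv_arith (fun v => PySem.List.pyGetD cnt v 0) h t u hGnn hh ht hu
  beta_reduce at harith
  have e2 : PySem.List.pyGetD (PySem.List.pySetD
        (PySem.List.pySetD cnt h (PySem.List.pyGetD cnt h 0 - 1)) t
        ((if t = h then PySem.List.pyGetD cnt h 0 - 1 else PySem.List.pyGetD cnt t 0) - 1)) u 0
      = if u = t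
          then (if t = h then PySem.List.pyGetD cnt h 0 - 1 else PySem.List.pyGetD cnt t 0) - 1
          else if u = h then PySem.List.pyGetD cnt h 0 - 1 else PySem.List.pyGetD cnt u 0 := by
    rw [pv_getD_setD _ t u _ ht.1 (by rw [PySem.List.length_pySetD, hlen]; exact_mod_cast ht.2) hu.1]
    by_cases hut : u = t
    · simp [hut]
    · rw [if_neg hut, if_neg hut,
        pv_getD_setD cnt h u _ hh.1 (by rw [hlen]; exact_mod_cast hh.2) hu.1]
  have e1 : PySem.List.pyGetD (PySem.List.pySetD cnt h (PySem.List.pyGetD cnt h 0 - 1)) t 0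
      = if t = h then PySem.List.pyGetD cnt h 0 - 1 else PySem.List.pyGetD cnt t 0 :=
    pv_getD_setD cnt h t _ hh.1 (by rw [hlen]; exact_mod_cast hh.2) ht.1
  unfold pvLeafA
  rw [pvCond0, pvCond1, pvCond2]
  rw [Bool.eq_iff_iff]
  simp only [Bool.and_eq_true, Bool.and_true, decide_eq_true_eq, beq_iff_eq,
    List.all_eq_true, e1, e2]
  constructor
  · rintro ⟨⟨⟨hch, h0⟩, hct⟩, hcu, hpar⟩
    refine ⟨⟨h0, hpar⟩, ?_⟩
    intro v hv
    have hv' : 0 ≤ v ∧ v < 10 := by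
      rw [PySem.List.mem_pyRange_one] at hv; omega
    rw [g3 v hv'.1 hv'.2]
    exact harith.mp ⟨hch, hct, hcu⟩ v hv'.1 hv'.2
  · rintro ⟨⟨h0, hpar⟩, hall⟩
    have hF : ∀ v : Int, 0 ≤ v → v < 10 →
        (if v = h then (1:Int) else 0) + (if v = t then 1 else 0) + (if v = u then 1 else 0)
          ≤ PySem.List.pyGetD cnt v 0 := by
      intro v h1 h2
      have hv : v ∈ PySem.List.pyRange 0 10 1 := by
        rw [PySem.List.mem_pyRange_one]; omega
      have hx := hall v hv
      rw [g3 v h1 h2] at hx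
      simpa using hx
    obtain ⟨hA, hB, hC⟩ := harith.mpr hF
    exact ⟨⟨⟨hA, h0⟩, hB⟩, hC, hpar⟩

set_option maxRecDepth 40000 in
lemma pv_range_flat :
    PySem.List.pyRange 100 1000 2 =
      pvD.flatMap (fun h => pvD.flatMap (fun t => pvD.flatMap (fun u =>
        if decide (0 < h) && (PySem.Int.mod u 2 == 0) then [100 * h + 10 * t + u] else []))) := by
  decide

lemma pv_main (cnt : List Int) (hlen : cnt.length = 10) (hnn : ∀ a ∈ cnt, 0 ≤ a) :
    pvDfs 3 cnt 0 [] = (PySem.List.pyRange 100 1000 2).filter (pvFits cnt) := by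
  have hmemD : ∀ x ∈ pvD, 0 ≤ x ∧ x < 10 := by decide
  have hA : pvDfs 3 cnt 0 [] =
      pvD.flatMap (fun h => pvD.flatMap (fun t => pvD.flatMap (fun u =>
        if pvLeafA cnt h t u then [((0 * 10 + h) * 10 + t) * 10 + u] else []))) := by
    rw [show (3:Nat) = 2+1 from rfl, pvDfs_succ, pv_enum10 cnt hlen, List.flatMap_map,
        List.nil_append]
    apply pv_flatMap_congr
    intro h hmemh
    simp only
    rw [show (2:Nat) - 2 = 0 from rfl,
        show (2:Nat) = 1+1 from rfl, pvDfs_succ,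
        pv_enum10 _ (by rw [PySem.List.length_pySetD, hlen]),
        List.flatMap_map, List.nil_append, pv_if_flatMap]
    apply pv_flatMap_congr
    intro t hmemt
    simp only
    rw [show (2:Nat) - 1 = 1 from rfl, pv_if_if,
        show (1:Nat) = 0+1 from rfl, pvDfs_succ,
        pv_enum10 _ (by rw [PySem.List.length_pySetD, PySem.List.length_pySetD, hlen]),
        List.flatMap_map, List.nil_append, pv_if_flatMap]
    apply pv_flatMap_congr
    intro u hmemu
    simp only
    rw [show (2:Nat) - 0 = 2 from rfl, pv_if_if]
    rfl
  have hB : (PySem.List.pyRange 100 1000 2).filter (pvFits cnt) =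
      pvD.flatMap (fun h => pvD.flatMap (fun t => pvD.flatMap (fun u =>
        if (decide (0 < h) && (PySem.Int.mod u 2 == 0)) && pvFits cnt (100 * h + 10 * t + u)
        then [100 * h + 10 * t + u] else []))) := by
    rw [pv_range_flat]
    simp only [pv_filter_flatMap, pv_filter_if]
  rw [hA, hB]
  apply pv_flatMap_congr; intro h hmemh
  apply pv_flatMap_congr; intro t hmemt
  apply pv_flatMap_congr; intro u hmemu
  rw [pv_leaf cnt hlen hnn h t u (hmemD h hmemh) (hmemD t hmemt) (hmemD u hmemu)]
  split_ifs
  · norm_num; ring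
  · rfl

-- ===== VERDICT (by name: the statement is the Claim_ definition above) =====
theorem findEvenNumbers3_spec : Claim_equal_findEvenNumbers3 := by
  intro digits _ _
  unfold Spec_findEvenNumbers3 findEvenNumbers3 findEvenNumbers3_alt
  rw [pv_main (pvCount digits) (pv_count_len digits) (pv_count_nonneg digits)]
  rw [PySem.List.foldl_append_if_eq_filter]
  simp
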